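-- pv_equiv track=rewrite | github.com/strayByte2022/bigo-blue | dynamic-array/vitaly-and-string.py | next_string
-- ===== SOURCE A (Python) =====
-- def next_string(s):
--
--     s_list = list(s)
--
--     for i in range(len(s) - 1, -1, -1):
--         if s_list[i] != 'z':
--             s_list[i] = chr(ord(s_list[i]) + 1)
--             return "".join(s_list[:i+1]) + 'a' * (len(s) - i - 1)
--         s_list[i] = 'a'
--
--     return "".join(s_list)
-- ===== SOURCE B (Python) =====
-- def next_string(s):
--     if not s:
--         return ''
--     head, last = s[:-1], s[-1]
--     if last != 'z':
--         return head + chr(ord(last) + 1)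
--     return next_string(head) + 'a'
-- ===== Notes on version B (the rewrite author's own statement) =====
-- stated objective: alternative
-- what changed: A's iterative backward index loop with in-place list mutation and early return is replaced by a structural recursion on the string: increment the final character if it does not carry, otherwise recurse on the prefix and append the reset character.
import Mathlib
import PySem

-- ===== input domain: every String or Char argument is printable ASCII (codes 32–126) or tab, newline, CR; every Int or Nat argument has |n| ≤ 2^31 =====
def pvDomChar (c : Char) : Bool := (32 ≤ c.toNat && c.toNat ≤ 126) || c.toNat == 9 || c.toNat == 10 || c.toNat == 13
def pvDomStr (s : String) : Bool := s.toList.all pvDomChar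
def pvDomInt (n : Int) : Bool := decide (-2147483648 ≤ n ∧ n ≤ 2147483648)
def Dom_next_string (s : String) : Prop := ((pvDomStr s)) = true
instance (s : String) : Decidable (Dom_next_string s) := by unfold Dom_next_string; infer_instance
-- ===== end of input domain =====

-- B replaces A's backward mutating index loop by a structural recursion on the last character (objective: alternative decomposition).

-- ===== PORT A =====
-- A's for-loop over i = len-1 .. 0: fuel j means index j-1 is examined next; sl is the mutated s_list
def nextStringLoop (n : Nat) (sl : List Char) : Nat → String
  | 0 => String.mk sl                                   -- loop exhausted: return "".join(s_list)
  | j + 1 =>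
    let c := sl.getD j ' '                              -- s_list[i], always in range here
    if c ≠ 'z' then
      -- s_list[i] = chr(ord(s_list[i])+1); return "".join(s_list[:i+1]) + 'a'*(len(s)-i-1)
      String.mk ((sl.set j (Char.ofNat (c.toNat + 1))).take (j + 1) ++ List.replicate (n - j - 1) 'a')
    else
      nextStringLoop n (sl.set j 'a') j                 -- s_list[i] = 'a'; continue

def next_string (s : String) : String :=
  nextStringLoop s.toList.length s.toList s.toList.length

-- ===== PORT B =====
-- B recurses on the LAST character of s; realized on the reversed character list so the
-- recursion is structural (head of the reversed list = last character of the string).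
def nextRev : List Char → List Char
  | [] => []                                            -- '' → ''
  | c :: rest =>
    if c ≠ 'z' then Char.ofNat (c.toNat + 1) :: rest    -- head + chr(ord(last)+1)
    else 'a' :: nextRev rest                            -- next_string(head) + 'a'

def next_string_alt (s : String) : String :=
  String.mk (nextRev s.toList.reverse).reverse

-- ===== PRECONDITION & SPEC =====
def Spec_next_string (s : String) (out : String) : Prop := out = next_string_alt s
instance (s : String) (out : String) : Decidable (Spec_next_string s out) := by unfold Spec_next_string; infer_instance

-- ===== CLAIM (what is proved, stated in full; the proofs are below) =====
def Claim_equal_next_string : Prop := ∀ (s : String), Dom_next_string s → Spec_next_string s (next_string s)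

-- ===== LEMMAS AND PROOFS =====
-- loop invariant: after A's loop has turned the suffix beyond p into 'a's, it computes B's
-- recursion applied to p, followed by those 'a's
lemma nextStringLoop_key (p : List Char) (m : Nat) :
    nextStringLoop (p.length + m) (p ++ List.replicate m 'a') p.length =
      String.mk ((nextRev p.reverse).reverse ++ List.replicate m 'a') := by
  induction p using List.reverseRecOn generalizing m with
  | nil => simp [nextStringLoop, nextRev]
  | append_singleton q c ih =>
    have hget : (q ++ [c] ++ List.replicate m 'a').getD q.length ' ' = c := by
      simp [List.getD, List.append_assoc]
    by_cases hc : c = 'z'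
    · subst hc
      have hset : (q ++ ['z'] ++ List.replicate m 'a').set q.length 'a'
          = q ++ List.replicate (m + 1) 'a' := by
        simp [List.append_assoc, List.replicate_succ]
      have hlen : q.length + 1 + m = q.length + (m + 1) := by omega
      rw [show (q ++ ['z']).length = q.length + 1 by simp, hlen]
      rw [show nextStringLoop (q.length + (m + 1)) (q ++ ['z'] ++ List.replicate m 'a')
            (q.length + 1)
          = nextStringLoop (q.length + (m + 1))
              ((q ++ ['z'] ++ List.replicate m 'a').set q.length 'a') q.length from by
        simp only [nextStringLoop, hget]; rfl]
      rw [hset, ih (m + 1)]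
      have hrev : nextRev (q ++ ['z']).reverse = 'a' :: nextRev q.reverse := by
        simp [nextRev]
      rw [hrev]
      simp [List.replicate_succ]
    · have hset : (q ++ [c] ++ List.replicate m 'a').set q.length (Char.ofNat (c.toNat + 1))
          = q ++ ([Char.ofNat (c.toNat + 1)] ++ List.replicate m 'a') := by
        simp [List.append_assoc]
      rw [show (q ++ [c]).length = q.length + 1 by simp]
      rw [show nextStringLoop (q.length + 1 + m) (q ++ [c] ++ List.replicate m 'a')
            (q.length + 1)
          = String.mk (((q ++ [c] ++ List.replicate m 'a').set q.length
              (Char.ofNat (((q ++ [c] ++ List.replicate m 'a').getD q.length ' ').toNat + 1))).take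
              (q.length + 1) ++ List.replicate (q.length + 1 + m - q.length - 1) 'a') from by
        simp only [nextStringLoop, hget, hc, ne_eq, not_false_iff, if_pos]]
      rw [hget, hset]
      have htake : (q ++ ([Char.ofNat (c.toNat + 1)] ++ List.replicate m 'a')).take (q.length + 1)
          = q ++ [Char.ofNat (c.toNat + 1)] := by
        rw [List.take_append]
        simp [List.take_succ_cons]
      rw [htake]
      have hrev : nextRev (q ++ [c]).reverse = Char.ofNat (c.toNat + 1) :: q.reverse := by
        simp [nextRev, hc]
      rw [hrev]
      have harith : q.length + 1 + m - q.length - 1 = m := by omega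
      simp [harith]

-- ===== VERDICT (by name: the statement is the Claim_ definition above) =====
theorem next_string_spec : Claim_equal_next_string := by
  intro s _
  unfold Spec_next_string next_string next_string_alt
  have h := nextStringLoop_key s.toList 0
  simpa using h
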